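-- pv_equiv track=rewrite | github.com/fanyangAlex/codewarsRep | 6kyu/Rectangle into Squares/sqInRect.py | sqInRect
-- ===== SOURCE A (Python) =====
-- def sqInRect(lng, wdth):
--     if lng == wdth:
--         return None
--     big = max(lng, wdth)
--     small = min(lng, wdth)
--     result = []
--     while small > 0:
--         result.append(small)
--         small = min(big-small, small)
--         big = max(big-small, small)
--     return result
-- ===== SOURCE B (Python) =====
-- def sqInRect(lng, wdth):
--     if lng == wdth:
--         return None
--
--     def cf(a, b):
--         # continued-fraction decomposition of the rectangle (a >= b):
--         # a list of (size, count) pairs, one per distinct square size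
--         if b <= 0:
--             return []
--         return [(b, a // b)] + cf(b, a % b)
--
--     pairs = cf(max(lng, wdth), min(lng, wdth))
--     return [s for s, c in pairs for _ in range(c)]
-- ===== Notes on version B (the rewrite author's own statement) =====
-- stated objective: alternative
-- what changed: Replaces A's one-square-per-iteration subtractive while loop by a recursive continued-fraction decomposition producing (size,count) run pairs via // and %, which are then expanded into the flat list by a comprehension.
import Mathlib
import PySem

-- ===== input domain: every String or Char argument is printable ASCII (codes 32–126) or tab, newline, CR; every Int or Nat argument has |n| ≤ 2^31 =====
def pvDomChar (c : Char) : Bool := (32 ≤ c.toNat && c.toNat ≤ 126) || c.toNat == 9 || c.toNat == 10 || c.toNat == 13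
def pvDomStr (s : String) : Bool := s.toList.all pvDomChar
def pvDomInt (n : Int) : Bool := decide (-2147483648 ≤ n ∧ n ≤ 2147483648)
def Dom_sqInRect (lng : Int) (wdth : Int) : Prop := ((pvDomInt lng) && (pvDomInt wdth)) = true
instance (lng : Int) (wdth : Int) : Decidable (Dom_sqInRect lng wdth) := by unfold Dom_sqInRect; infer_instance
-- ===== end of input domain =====

-- B replaces A's one-square-per-iteration subtractive loop by a recursive
-- continued-fraction decomposition into (size, count) run pairs, expanded afterwards.


-- ===== PORT A =====
-- A's while loop: append small; small = min(big-small, small); big = max(big-small, small).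
-- Structural recursion on a fuel argument; the caller passes enough fuel
-- (big.toNat + 2*small.toNat strictly decreases each iteration), so fuel never runs out.
def sqInRectLoop (fuel : Nat) (big small : Int) : List Int :=
  match fuel with
  | 0 => []
  | fuel + 1 =>
    if 0 < small then
      let small' := min (big - small) small
      let big' := max (big - small') small'
      small :: sqInRectLoop fuel big' small'
    else []

def sqInRect (lng : Int) (wdth : Int) : Option (List Int) :=
  if lng == wdth then none
  else
    some (sqInRectLoop ((max lng wdth).toNat + 2 * (min lng wdth).toNat)
      (max lng wdth) (min lng wdth))

-- ===== PORT B =====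
-- B's recursive helper cf(a, b): one (size, count) pair per distinct square size.
-- Fuel: b.toNat strictly decreases (a % b < b for 0 < b), so b.toNat + 1 suffices.
def sqInRectCf (fuel : Nat) (a b : Int) : List (Int × Int) :=
  match fuel with
  | 0 => []
  | fuel + 1 =>
    if b ≤ 0 then []
    else (b, PySem.Int.floordiv a b) :: sqInRectCf fuel b (PySem.Int.mod a b)

def sqInRect_alt (lng : Int) (wdth : Int) : Option (List Int) :=
  if lng == wdth then none
  else
    let pairs := sqInRectCf ((min lng wdth).toNat + 1) (max lng wdth) (min lng wdth)
    -- [s for s, c in pairs for _ in range(c)]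
    some (pairs.flatMap (fun p => List.replicate p.2.toNat p.1))

-- ===== PRECONDITION & SPEC =====
def Spec_sqInRect (lng : Int) (wdth : Int) (out : Option (List Int)) : Prop := out = sqInRect_alt lng wdth
instance (lng : Int) (wdth : Int) (out : Option (List Int)) : Decidable (Spec_sqInRect lng wdth out) := by unfold Spec_sqInRect; infer_instance

-- ===== CLAIM (what is proved, stated in full; the proofs are below) =====
def Claim_equal_sqInRect : Prop := ∀ (lng : Int) (wdth : Int), Dom_sqInRect lng wdth → Spec_sqInRect lng wdth (sqInRect lng wdth)

-- ===== LEMMAS AND PROOFS =====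

-- abbreviation used only in the proofs: the expansion of the pair list
def pvExpand (l : List (Int × Int)) : List Int :=
  l.flatMap (fun p => List.replicate p.2.toNat p.1)

theorem sqInRectLoop_nonpos {fuel : Nat} {big small : Int} (hs : ¬ 0 < small) :
    sqInRectLoop fuel big small = [] := by
  cases fuel <;> simp [sqInRectLoop, hs]

theorem sqInRectCf_nonpos {fuel : Nat} {a b : Int} (hs : ¬ 0 < b) :
    sqInRectCf fuel a b = [] := by
  cases fuel <;> simp [sqInRectCf]; omega

-- A's step when big < 2*small: emit small, then the rectangle is (small, big-small) (swap).
theorem sqInRectLoop_low {fuel : Nat} {big small : Int} (hs : 0 < small) (hb : big < 2 * small) :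
    sqInRectLoop (fuel + 1) big small = small :: sqInRectLoop fuel small (big - small) := by
  rw [sqInRectLoop]
  have h1 : min (big - small) small = big - small := by omega
  have h2 : max (big - (big - small)) (big - small) = small := by omega
  simp only [hs, if_pos, h1, h2]

-- A's step when 2*small ≤ big: emit small, subtract one square.
theorem sqInRectLoop_high {fuel : Nat} {big small : Int} (hs : 0 < small) (hb : 2 * small ≤ big) :
    sqInRectLoop (fuel + 1) big small = small :: sqInRectLoop fuel (big - small) small := by
  rw [sqInRectLoop]
  have h1 : min (big - small) small = small := by omega
  have h2 : max (big - small) small = big - small := by omega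
  simp only [hs, if_pos, h1, h2]

-- Expanding B's pairs absorbs one subtracted square when 2*b ≤ a (same fuel both sides).
theorem expand_cf_high {fuel : Nat} {a b : Int} (hs : 0 < b) (hb : 2 * b ≤ a) :
    pvExpand (sqInRectCf (fuel + 1) a b) = b :: pvExpand (sqInRectCf (fuel + 1) (a - b) b) := by
  conv_lhs => rw [sqInRectCf]
  conv_rhs => rw [sqInRectCf]
  simp only [show ¬ b ≤ 0 by omega, if_false]
  rw [PySem.Int.floordiv_eq_ediv_of_pos hs, PySem.Int.floordiv_eq_ediv_of_pos hs,
      PySem.Int.mod_eq_emod_of_pos hs, PySem.Int.mod_eq_emod_of_pos hs]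
  have hdiv : a / b = (a - b) / b + 1 := by
    have := Int.add_mul_ediv_right (a - b) 1 (by omega : b ≠ 0)
    simpa [sub_add_cancel] using this
  have hmod : a % b = (a - b) % b := by
    conv_lhs => rw [show a = a - b + 1 * b by ring]
    exact Int.add_mul_emod_self_right ..
  have hq : 0 ≤ (a - b) / b := Int.ediv_nonneg (by omega) (by omega)
  rw [hdiv, hmod]
  have : ((a - b) / b + 1).toNat = ((a - b) / b).toNat + 1 := by omega
  simp [pvExpand, this, List.replicate_succ]

-- B's pairs when b ≤ a < 2*b: count 1, remainder a - b.
theorem expand_cf_low {fuel : Nat} {a b : Int} (hs : 0 < b) (h1 : b ≤ a) (hb : a < 2 * b) :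
    pvExpand (sqInRectCf (fuel + 1) a b) = b :: pvExpand (sqInRectCf fuel b (a - b)) := by
  conv_lhs => rw [sqInRectCf]
  simp only [show ¬ b ≤ 0 by omega, if_false]
  have hq : PySem.Int.floordiv a b = 1 := by
    rw [PySem.Int.floordiv_eq_iff_of_pos hs]; constructor <;> omega
  have hr : PySem.Int.mod a b = a - b := by
    have := PySem.Int.floordiv_mul_add_mod a b
    rw [hq] at this; omega
  rw [hq, hr]
  simp [pvExpand]

-- The core equivalence: on any state with small ≤ big, with each side given enough
-- fuel for its own measure, A's loop equals the expansion of B's pair list.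
theorem loop_eq_expand (n : ℕ) : ∀ (fa fb : Nat) (big small : Int), (big + small).toNat ≤ n →
    small ≤ big → big.toNat + 2 * small.toNat ≤ fa → small.toNat < fb →
    sqInRectLoop fa big small = pvExpand (sqInRectCf fb big small) := by
  induction n with
  | zero =>
    intro fa fb big small hn hle hfa hfb
    by_cases hs : 0 < small
    · exfalso; omega
    · rw [sqInRectLoop_nonpos hs, sqInRectCf_nonpos hs]; rfl
  | succ n ih =>
    intro fa fb big small hn hle hfa hfb
    by_cases hs : 0 < small
    · obtain ⟨fa', rfl⟩ : ∃ fa', fa = fa' + 1 := ⟨fa - 1, by omega⟩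
      obtain ⟨fb', rfl⟩ : ∃ fb', fb = fb' + 1 := ⟨fb - 1, by omega⟩
      by_cases hb : 2 * small ≤ big
      · rw [sqInRectLoop_high hs hb, expand_cf_high hs hb]
        rw [ih fa' (fb' + 1) (big - small) small (by omega) (by omega) (by omega) (by omega)]
      · rw [not_le] at hb
        rw [sqInRectLoop_low hs hb, expand_cf_low hs hle hb]
        rw [ih fa' fb' small (big - small) (by omega) (by omega) (by omega) (by omega)]
    · rw [sqInRectLoop_nonpos hs, sqInRectCf_nonpos hs]; rfl

-- ===== VERDICT (by name: the statement is the Claim_ definition above) =====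
theorem sqInRect_spec : Claim_equal_sqInRect := by
  intro lng wdth _
  unfold Spec_sqInRect sqInRect sqInRect_alt
  by_cases h : lng == wdth
  · simp [h]
  · simp only [h, Bool.false_eq_true, if_false]
    exact congrArg some
      (loop_eq_expand (max lng wdth + min lng wdth).toNat _ _ _ _ le_rfl min_le_max le_rfl
        (Nat.lt_succ_self _))
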